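-- pv_equiv track=rewrite | github.com/ElGrandeChungus/azimuth | backend/app/routers/messages.py | _normalize_entry_name
-- ===== SOURCE A (Python) =====
-- def _normalize_entry_name(value: str) -> str:
--     cleaned = value.strip().strip('"\'')
--     lowered = cleaned.lower()
--     for sep in [' who ', ' that ', ' which ']:
--         idx = lowered.find(sep)
--         if idx != -1:
--             cleaned = cleaned[:idx]
--             lowered = cleaned.lower()
--     return cleaned.strip(' .,!?:;')
-- ===== SOURCE B (Python) =====
-- def _normalize_entry_name(value: str) -> str:
--     cleaned = value.strip().strip('"\'')
--     low = cleaned.lower()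
--     hits = [(low.find(sep), len(sep)) for sep in (' who ', ' that ', ' which ')]
--     cut = len(cleaned)
--     for pos, width in hits:
--         if 0 <= pos and pos + width <= cut:
--             cut = pos
--     return cleaned[:cut].strip(' .,!?:;')
-- ===== Notes on version B (the rewrite author's own statement) =====
-- stated objective: alternative
-- what changed: B replaces A's mutate-and-rescan loop (truncate the string, re-lower it, re-search the shrunk string per separator) by computing each separator's find index once on the original lowered string and folding a single integer cut position (a hit counts only if it lies fully before the current cut), slicing and stripping once at the end.
import Mathlib
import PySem

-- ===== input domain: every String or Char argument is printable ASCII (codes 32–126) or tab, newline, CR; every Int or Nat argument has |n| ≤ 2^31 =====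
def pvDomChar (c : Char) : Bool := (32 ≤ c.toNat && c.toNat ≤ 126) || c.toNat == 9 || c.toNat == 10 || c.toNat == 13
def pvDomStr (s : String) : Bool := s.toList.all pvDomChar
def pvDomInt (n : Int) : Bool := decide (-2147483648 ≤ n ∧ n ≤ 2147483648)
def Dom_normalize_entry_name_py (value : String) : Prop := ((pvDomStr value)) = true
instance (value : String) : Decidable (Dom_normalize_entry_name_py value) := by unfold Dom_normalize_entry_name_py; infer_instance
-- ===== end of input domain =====

-- B computes each separator's find index once on the original lowered string and folds an
-- integer cut position instead of A's truncate/re-lower/re-search loop (alternative decomposition).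


-- ===== PORT A =====
-- A-side helper: the body of A's for-loop, acting on the (cleaned, lowered) pair
def pvStepA (st : String × String) (sep : String) : String × String :=
  let idx := PySem.Str.find st.2 sep
  if idx ≠ -1 then
    let c := PySem.Str.slice st.1 none (some idx)
    (c, PySem.Str.lower c)
  else st

def normalize_entry_name_py (value : String) : String :=
  let cleaned := PySem.Str.stripChars (PySem.Str.strip value) "\"'"
  let lowered := PySem.Str.lower cleaned
  let st := [" who ", " that ", " which "].foldl pvStepA (cleaned, lowered)
  PySem.Str.stripChars st.1 " .,!?:;"

-- ===== PORT B =====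
-- B-side helper: the body of B's for-loop over precomputed (pos, width) hits
def pvStepB (cut : Int) (p : Int × Int) : Int :=
  if 0 ≤ p.1 ∧ p.1 + p.2 ≤ cut then p.1 else cut

def normalize_entry_name_py_alt (value : String) : String :=
  let cleaned := PySem.Str.stripChars (PySem.Str.strip value) "\"'"
  let low := PySem.Str.lower cleaned
  let hits := [" who ", " that ", " which "].map (fun sep => (PySem.Str.find low sep, PySem.Str.len sep))
  let cut := hits.foldl pvStepB (PySem.Str.len cleaned)
  PySem.Str.stripChars (PySem.Str.slice cleaned none (some cut)) " .,!?:;"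

-- ===== PRECONDITION & SPEC =====
def Spec_normalize_entry_name_py (value : String) (out : String) : Prop := out = normalize_entry_name_py_alt value
instance (value : String) (out : String) : Decidable (Spec_normalize_entry_name_py value out) := by unfold Spec_normalize_entry_name_py; infer_instance

-- ===== CLAIM (what is proved, stated in full; the proofs are below) =====
def Claim_equal_normalize_entry_name_py : Prop := ∀ (value : String), Dom_normalize_entry_name_py value → Spec_normalize_entry_name_py value (normalize_entry_name_py value)

-- ===== LEMMAS AND PROOFS =====

-- find points at k if k carries the first occurrence
lemma pv_find_eq_of_first (s p : List Char) (k : Nat)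
    (hocc : p <+: s.drop k) (hmin : ∀ j < k, ¬ p <+: s.drop j) :
    PySem.Chars.find s p = (k : Int) := by
  have hin : p <:+: s :=
    hocc.isInfix.trans (List.drop_suffix k s).isInfix
  have h0 : 0 ≤ PySem.Chars.find s p := (PySem.Chars.find_nonneg_iff s p).mpr hin
  obtain ⟨hf, hfmin⟩ := PySem.Chars.find_spec h0
  have hk : (PySem.Chars.find s p).toNat = k := by
    rcases lt_trichotomy (PySem.Chars.find s p).toNat k with h | h | h
    · exact absurd hf (hmin _ h)
    · exact h
    · exact absurd hocc (hfmin k h)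
  omega

-- find on a prefix: the global first hit if it fits entirely before the cut, else -1
lemma pv_find_take (s p : List Char) (n : Nat) :
    PySem.Chars.find (s.take n) p =
      if 0 ≤ PySem.Chars.find s p ∧ PySem.Chars.find s p + (p.length : Int) ≤ (n : Int)
      then PySem.Chars.find s p else -1 := by
  by_cases hc : 0 ≤ PySem.Chars.find s p ∧ PySem.Chars.find s p + (p.length : Int) ≤ (n : Int)
  · rw [if_pos hc]
    obtain ⟨h0, hfit⟩ := hc
    obtain ⟨hf, hfmin⟩ := PySem.Chars.find_spec h0
    have hk := pv_find_eq_of_first (s.take n) p (PySem.Chars.find s p).toNat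
      (by rw [List.drop_take]
          exact List.prefix_take_iff.mpr ⟨hf, by omega⟩)
      (by intro j hj hpre
          rw [List.drop_take] at hpre
          exact hfmin j hj (List.prefix_take_iff.mp hpre).1)
    rw [hk]; omega
  · rw [if_neg hc, PySem.Chars.find_eq_neg_one_iff]
    intro hinf
    have hpnil : p ≠ [] := by
      intro hp
      exact hc (by simp [hp, PySem.Chars.find_nil])
    obtain ⟨j, hj⟩ := (PySem.Chars.exists_prefix_drop_iff_isIn p (s.take n)).mpr
      ((PySem.Chars.isIn_iff_infix p (s.take n)).mpr hinf)
    rw [List.drop_take] at hj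
    obtain ⟨hp, hl⟩ := List.prefix_take_iff.mp hj
    have hjn : j < n := by
      by_contra hge
      exact hpnil (List.eq_nil_of_length_eq_zero (by
        have := hj.length_le
        simp at this
        omega))
    have hin : p <:+: s := hp.isInfix.trans (List.drop_suffix j s).isInfix
    have h0 : 0 ≤ PySem.Chars.find s p := (PySem.Chars.find_nonneg_iff s p).mpr hin
    obtain ⟨_, hfmin⟩ := PySem.Chars.find_spec h0
    have hle : (PySem.Chars.find s p).toNat ≤ j := by
      by_contra hlt
      exact hfmin j (by omega) hp
    exact hc ⟨h0, by omega⟩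

-- one step of A on a prefix state mirrors one pvStepB update of the cut position
lemma pv_step (cl : List Char) (n : Nat) (sep : String) :
    pvStepA (String.ofList (cl.take n), PySem.Str.lower (String.ofList (cl.take n))) sep
      = (String.ofList (cl.take (pvStepB (n : Int)
            (PySem.Chars.find (PySem.Chars.lower cl) sep.toList, (sep.toList.length : Int))).toNat),
         PySem.Str.lower (String.ofList (cl.take (pvStepB (n : Int)
            (PySem.Chars.find (PySem.Chars.lower cl) sep.toList, (sep.toList.length : Int))).toNat))) := by
  have hfind : PySem.Str.find (PySem.Str.lower (String.ofList (cl.take n))) sep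
      = PySem.Chars.find ((PySem.Chars.lower cl).take n) sep.toList := by
    simp only [PySem.Str.find, PySem.Str.lower, String.toList_ofList, PySem.Chars.lower,
      List.map_take]
  by_cases hc : 0 ≤ PySem.Chars.find (PySem.Chars.lower cl) sep.toList ∧
      PySem.Chars.find (PySem.Chars.lower cl) sep.toList + (sep.toList.length : Int) ≤ (n : Int)
  · have hidx : PySem.Str.find (PySem.Str.lower (String.ofList (cl.take n))) sep
        = PySem.Chars.find (PySem.Chars.lower cl) sep.toList := by
      rw [hfind, pv_find_take, if_pos hc]
    have hB : pvStepB (n : Int)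
        (PySem.Chars.find (PySem.Chars.lower cl) sep.toList, (sep.toList.length : Int))
        = PySem.Chars.find (PySem.Chars.lower cl) sep.toList := by
      simp only [pvStepB]
      exact if_pos hc
    have hslice : PySem.Str.slice (String.ofList (cl.take n)) none
          (some (PySem.Chars.find (PySem.Chars.lower cl) sep.toList))
        = String.ofList (cl.take (PySem.Chars.find (PySem.Chars.lower cl) sep.toList).toNat) := by
      have hle : (PySem.Chars.find (PySem.Chars.lower cl) sep.toList).toNat ≤ n := by omega
      simp only [PySem.Str.slice, String.toList_ofList]
      rw [PySem.Chars.slice_eq_listSlice, PySem.List.slice_to _ hc.1,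
          List.take_take, Nat.min_eq_left hle]
    simp only [pvStepA]
    rw [hidx, if_pos (by omega : PySem.Chars.find (PySem.Chars.lower cl) sep.toList ≠ -1),
        hB, hslice]
  · have hidx : PySem.Str.find (PySem.Str.lower (String.ofList (cl.take n))) sep = -1 := by
      rw [hfind, pv_find_take, if_neg hc]
    have hB : pvStepB (n : Int)
        (PySem.Chars.find (PySem.Chars.lower cl) sep.toList, (sep.toList.length : Int))
        = (n : Int) := by
      simp only [pvStepB]
      exact if_neg hc
    simp only [pvStepA]
    rw [hidx, if_neg (by simp : ¬ (-1 : Int) ≠ -1), hB, Int.toNat_natCast]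

-- pvStepB never makes the cut negative
lemma pv_stepB_nonneg (c : Int) (p : Int × Int) (h : 0 ≤ c) : 0 ≤ pvStepB c p := by
  unfold pvStepB; split_ifs with hc
  · exact hc.1
  · exact h

-- the chained correspondence over any separator list
lemma pv_chain (cl : List Char) (seps : List String) (n : Nat) :
    (seps.foldl pvStepA
        (String.ofList (cl.take n), PySem.Str.lower (String.ofList (cl.take n)))).1
      = String.ofList (cl.take
          ((seps.map (fun sep =>
              (PySem.Chars.find (PySem.Chars.lower cl) sep.toList, (sep.toList.length : Int)))).foldl
            pvStepB (n : Int)).toNat) := by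
  induction seps generalizing n with
  | nil => simp
  | cons sep rest ih =>
      simp only [List.foldl_cons, List.map_cons]
      rw [pv_step]
      have h0 : 0 ≤ pvStepB (n : Int)
          (PySem.Chars.find (PySem.Chars.lower cl) sep.toList, (sep.toList.length : Int)) :=
        pv_stepB_nonneg _ _ (by omega)
      rw [ih, Int.toNat_of_nonneg h0]

-- the fold keeps the cut nonnegative
lemma pv_fold_nonneg (ps : List (Int × Int)) (c : Int) (h : 0 ≤ c) :
    0 ≤ ps.foldl pvStepB c := by
  induction ps generalizing c with
  | nil => simpa using h
  | cons p rest ih => exact ih _ (pv_stepB_nonneg c p h)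

-- A's whole loop starting from cleaned itself
lemma pv_chain' (cleaned : String) (seps : List String) :
    (seps.foldl pvStepA (cleaned, PySem.Str.lower cleaned)).1
      = String.ofList (cleaned.toList.take
          ((seps.map (fun sep =>
              (PySem.Chars.find (PySem.Chars.lower cleaned.toList) sep.toList,
               (sep.toList.length : Int)))).foldl
            pvStepB ((cleaned.toList.length : Nat) : Int)).toNat) := by
  have h := pv_chain cleaned.toList seps cleaned.toList.length
  rwa [List.take_length, String.ofList_toList] at h

-- the two pipelines agree once the common prefix 'cleaned' is abstracted
lemma pv_main (cleaned : String) :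
    PySem.Str.stripChars
        (([" who ", " that ", " which "].foldl pvStepA (cleaned, PySem.Str.lower cleaned)).1)
        " .,!?:;"
      = PySem.Str.stripChars
          (PySem.Str.slice cleaned none
            (some (([" who ", " that ", " which "].map
                (fun sep => (PySem.Str.find (PySem.Str.lower cleaned) sep, PySem.Str.len sep))).foldl
              pvStepB (PySem.Str.len cleaned))))
          " .,!?:;" := by
  have hhits : ([" who ", " that ", " which "] : List String).map
        (fun sep => (PySem.Str.find (PySem.Str.lower cleaned) sep, PySem.Str.len sep))
      = ([" who ", " that ", " which "] : List String).map
        (fun sep => (PySem.Chars.find (PySem.Chars.lower cleaned.toList) sep.toList,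
                     (sep.toList.length : Int))) := by
    apply List.map_congr_left
    intro sep _
    simp only [PySem.Str.find, PySem.Str.lower, PySem.Str.len, String.toList_ofList]
  have hlen : PySem.Str.len cleaned = ((cleaned.toList.length : Nat) : Int) := rfl
  rw [hhits, hlen, pv_chain']
  have key : ∀ cut : Int, 0 ≤ cut →
      PySem.Str.stripChars (String.ofList (cleaned.toList.take cut.toNat)) " .,!?:;"
        = PySem.Str.stripChars (PySem.Str.slice cleaned none (some cut)) " .,!?:;" := by
    intro cut h0
    simp only [PySem.Str.slice]
    rw [PySem.Chars.slice_eq_listSlice, PySem.List.slice_to _ h0]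
  exact key _ (pv_fold_nonneg _ _ (by omega))

-- ===== VERDICT (by name: the statement is the Claim_ definition above) =====
theorem normalize_entry_name_py_spec : Claim_equal_normalize_entry_name_py := by
  intro value _
  show normalize_entry_name_py value = normalize_entry_name_py_alt value
  exact pv_main (PySem.Str.stripChars (PySem.Str.strip value) "\"'")
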